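-- pv_equiv track=rewrite | github.com/james-ralph8555/fdnix | packages/containers/nixpkgs-indexer/src/nixpkgs_extractor.py | _parse_name_version
-- ===== SOURCE A (Python) =====
-- from typing import Any, Dict, List, Optional, Tuple
--
-- def _parse_name_version(name: str) -> Tuple[str, str]:
--     """Parse package name and version from nix-eval-jobs name field."""
--     if not name:
--         return "unknown", "unknown"
--
--     # Nix package names are typically in format "name-version"
--     # We need to split carefully as names can contain dashes
--     parts = name.split('-')
--     if len(parts) < 2:
--         return name, "unknown"
--
--     # Try to find where version starts (usually a digit or 'v')
--     for i, part in enumerate(parts):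
--         if part and (part[0].isdigit() or part.startswith('v')):
--             package_name = '-'.join(parts[:i])
--             version = '-'.join(parts[i:])
--             return package_name if package_name else name, version
--
--     # Fallback: treat last part as version
--     return '-'.join(parts[:-1]), parts[-1]
-- ===== SOURCE B (Python) =====
-- def _parse_name_version(name):
--     """Parse package name and version by scanning chars once instead of split/join."""
--     if not name:
--         return "unknown", "unknown"
--     if '-' not in name:
--         return name, "unknown"
--     start = True
--     for p, ch in enumerate(name):
--         if start and (ch.isdigit() or ch == 'v'):
--             return (name if p <= 1 else name[:p - 1]), name[p:]
--         start = (ch == '-')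
--     q = name.rfind('-')
--     return name[:q], name[q + 1:]
-- ===== Notes on version B (the rewrite author's own statement) =====
-- stated objective: simpler
-- what changed: Replaces the split-on-dash parts list, the enumerate loop over parts and the dash-joins of part slices by a single left-to-right character scan that tracks a segment-start flag (with a reverse find for the fallback), never materialising the parts list.
import Mathlib
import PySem

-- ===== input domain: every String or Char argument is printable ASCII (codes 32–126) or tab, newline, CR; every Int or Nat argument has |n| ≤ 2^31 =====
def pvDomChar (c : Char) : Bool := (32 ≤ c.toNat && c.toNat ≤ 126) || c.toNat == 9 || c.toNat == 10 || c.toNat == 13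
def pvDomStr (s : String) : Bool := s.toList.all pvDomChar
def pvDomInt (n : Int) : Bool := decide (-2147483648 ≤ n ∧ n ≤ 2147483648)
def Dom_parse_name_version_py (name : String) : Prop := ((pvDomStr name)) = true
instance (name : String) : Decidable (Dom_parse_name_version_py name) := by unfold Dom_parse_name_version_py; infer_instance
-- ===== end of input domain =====

-- B replaces split/join over the dash-separated parts by a single left-to-right character scan
-- (tracking only a segment-start flag), with rfind for the fallback; return value only, same for all inputs.

-- ===== PORT A =====
-- the 'for i, part in enumerate(parts)' loop: first index whose part is nonempty and starts with a digit or 'v'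
def pvFindVer : List (List Char) → Nat → Option Nat
  | [], _ => none
  | part :: rest, i =>
    if (!part.isEmpty) && (PySem.Chars.isdigit (part.headD ' ') || PySem.Chars.startswith part ['v'])
    then some i else pvFindVer rest (i + 1)

def parse_name_version_py (name : String) : String × String :=
  if name.toList.isEmpty then ("unknown", "unknown")
  else
    let parts := PySem.Chars.splitOn name.toList ['-']
    if parts.length < 2 then (name, "unknown")
    else
      match pvFindVer parts 0 with
      | some i =>
        let pn := PySem.Chars.join ['-'] (PySem.List.slice parts none (some (i : Int)))
        let ver := PySem.Chars.join ['-'] (PySem.List.slice parts (some (i : Int)) none)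
        (if pn.isEmpty then name else String.ofList pn, String.ofList ver)
      | none =>
        (String.ofList (PySem.Chars.join ['-'] (PySem.List.slice parts none (some (-1)))),
         String.ofList (PySem.List.pyGetD parts (-1) []))

-- ===== PORT B =====
-- one pass over the characters; st is the 'start of a segment' flag
def pvScanB : List Char → Nat → Bool → Option Nat
  | [], _, _ => none
  | c :: t, q, st =>
    if st && (PySem.Chars.isdigit c || c == 'v') then some q
    else pvScanB t (q + 1) (c == '-')

def parse_name_version_py_alt (name : String) : String × String :=
  let cs := name.toList
  if cs.isEmpty then ("unknown", "unknown")
  else if !(PySem.Chars.isIn ['-'] cs) then (name, "unknown")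
  else
    match pvScanB cs 0 true with
    | some p => (if p ≤ 1 then name else String.ofList (cs.take (p - 1)), String.ofList (cs.drop p))
    | none =>
      let q := (PySem.Chars.rfind cs ['-']).toNat
      (String.ofList (cs.take q), String.ofList (cs.drop (q + 1)))

-- ===== PRECONDITION & SPEC =====
def Spec_parse_name_version_py (name : String) (out : String × String) : Prop := out = parse_name_version_py_alt name
instance (name : String) (out : String × String) : Decidable (Spec_parse_name_version_py name out) := by unfold Spec_parse_name_version_py; infer_instance

-- ===== CLAIM (what is proved, stated in full; the proofs are below) =====
def Claim_equal_parse_name_version_py : Prop := ∀ (name : String), Dom_parse_name_version_py name → Spec_parse_name_version_py name (parse_name_version_py name)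

-- ===== LEMMAS AND PROOFS =====

def pvQualC (c : Char) : Bool := PySem.Chars.isdigit c || c == 'v'

def pvQual : List Char → Bool
  | [] => false
  | c :: _ => pvQualC c

-- version-split scan returning the split itself: (prefix incl. trailing dash, version suffix)
def pvScan2 : List Char → Bool → Option (List Char × List Char)
  | [], _ => none
  | c :: t, st =>
    if st && pvQualC c then some ([], c :: t)
    else (pvScan2 t (c == '-')).map (fun uv => (c :: uv.1, uv.2))

-- part-level reformulation of A's loop: split parts at the first qualifying part
def pvRA : List (List Char) → Option (List (List Char) × List (List Char))
  | [] => none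
  | pt :: rest =>
    if pvQual pt then some ([], pt :: rest)
    else (pvRA rest).map (fun uv => (pt :: uv.1, uv.2))

def pvRAskip : List (List Char) → Option (List (List Char) × List (List Char))
  | [] => none
  | pt :: rest => (pvRA rest).map (fun uv => (pt :: uv.1, uv.2))

def pvF (uv : List (List Char) × List (List Char)) : List Char × List Char :=
  ((if uv.1 = [] then [] else PySem.Chars.join ['-'] uv.1 ++ ['-']), PySem.Chars.join ['-'] uv.2)

theorem pv_length_splitOnP (cs : List Char) :
    (List.splitOnP (· == '-') cs).length = cs.countP (· == '-') + 1 := by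
  induction cs with
  | nil => simp [List.splitOnP_nil]
  | cons c r ih =>
    rw [List.splitOnP_cons]
    by_cases h : (c == '-') = true
    · simp [h, List.countP_cons, ih]
    · simp [h, List.countP_cons, ih]

theorem pv_splitOnP_cons_ex (r : List Char) :
    ∃ pt rest, List.splitOnP (· == '-') r = pt :: rest := by
  have hlen := pv_length_splitOnP r
  cases hx : List.splitOnP (· == '-') r with
  | nil => rw [hx] at hlen; simp at hlen
  | cons a b => exact ⟨a, b, rfl⟩

theorem pv_splitOn_go_eq (fuel : Nat) : ∀ (l cur : List Char) (accs : List (List Char)),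
    l.length ≤ fuel →
    PySem.Chars.splitOn.go ['-'] fuel l cur accs =
      accs.reverse ++ (List.splitOnP (· == '-') l).modifyHead (cur.reverse ++ ·) := by
  induction fuel with
  | zero =>
    intro l cur accs h
    have hl : l = [] := List.eq_nil_of_length_eq_zero (Nat.le_zero.mp h)
    subst hl
    simp [PySem.Chars.splitOn.go, List.splitOnP_nil]
  | succ fuel ih =>
    intro l cur accs h
    cases l with
    | nil => simp [PySem.Chars.splitOn.go, List.splitOnP_nil]
    | cons c rest =>
      simp only [PySem.Chars.splitOn.go]
      by_cases hc : c = '-'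
      · subst hc
        have hpre : (['-'] : List Char).isPrefixOf ('-' :: rest) = true := by
          simp [List.isPrefixOf]
        rw [if_pos hpre]
        have hrest : rest.length ≤ fuel := by simpa using Nat.le_of_succ_le_succ h
        have hdrop : List.drop (['-'] : List Char).length ('-' :: rest) = rest := by simp
        rw [hdrop, ih rest [] (cur.reverse :: accs) hrest, List.splitOnP_cons]
        obtain ⟨pt, rest', hsp⟩ := pv_splitOnP_cons_ex rest
        simp [hsp]
      · have hpre : (['-'] : List Char).isPrefixOf (c :: rest) = false := by
          simp [List.isPrefixOf]
          intro h'; exact absurd h'.symm hc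
        rw [if_neg (by simp [hpre])]
        have hrest : rest.length ≤ fuel := by simpa using Nat.le_of_succ_le_succ h
        rw [ih rest (c :: cur) accs hrest, List.splitOnP_cons]
        have hb : (c == '-') = false := by simp [hc]
        rw [hb]
        obtain ⟨pt, rest', hsp⟩ := pv_splitOnP_cons_ex rest
        simp [hsp]

theorem pv_splitOn_eq (cs : List Char) :
    PySem.Chars.splitOn cs ['-'] = List.splitOnP (· == '-') cs := by
  have h := pv_splitOn_go_eq (cs.length + 1) cs [] [] (by omega)
  unfold PySem.Chars.splitOn
  rw [h]
  obtain ⟨pt, rest, hsp⟩ := pv_splitOnP_cons_ex cs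
  simp [hsp]

theorem pv_scanB_eq (t : List Char) : ∀ (st : Bool) (q : Nat),
    pvScanB t q st = (pvScan2 t st).map (fun uv => uv.1.length + q) := by
  induction t with
  | nil => intro st q; simp [pvScanB, pvScan2]
  | cons c t ih =>
    intro st q
    simp only [pvScanB, pvScan2, pvQualC]
    by_cases h : st && (PySem.Chars.isdigit c || c == 'v')
    · simp [h]
    · simp only [h, ih]
      cases pvScan2 t (c == '-') with
      | none => rfl
      | some uv => simp; omega

theorem pv_scan2_append {t : List Char} {st : Bool} {u v : List Char}
    (h : pvScan2 t st = some (u, v)) : u ++ v = t := by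
  induction t generalizing st u v with
  | nil => simp [pvScan2] at h
  | cons c t ih =>
    simp only [pvScan2] at h
    split at h
    · simp at h; simp [h]
    · obtain ⟨⟨u', v'⟩, hm, heq⟩ := Option.map_eq_some_iff.mp h
      simp at heq
      obtain ⟨hu, hv⟩ := heq
      subst hu; subst hv
      simpa using ih hm

theorem pv_RA_append {parts U V : List (List Char)}
    (h : pvRA parts = some (U, V)) : U ++ V = parts := by
  induction parts generalizing U V with
  | nil => simp [pvRA] at h
  | cons pt rest ih =>
    simp only [pvRA] at h
    split at h
    · simp at h; simp [h]
    · obtain ⟨⟨U', V'⟩, hm, heq⟩ := Option.map_eq_some_iff.mp h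
      simp at heq
      obtain ⟨hu, hv⟩ := heq
      subst hu; subst hv
      simpa using ih hm

theorem pv_findVer_eq (parts : List (List Char)) : ∀ i : Nat,
    pvFindVer parts i = (pvRA parts).map (fun uv => uv.1.length + i) := by
  induction parts with
  | nil => intro i; simp [pvFindVer, pvRA]
  | cons pt rest ih =>
    intro i
    have hc : ((!pt.isEmpty) && (PySem.Chars.isdigit (pt.headD ' ') || PySem.Chars.startswith pt ['v'])) = pvQual pt := by
      cases pt with
      | nil => simp [pvQual]
      | cons c t =>
        simp [pvQual, pvQualC, PySem.Chars.startswith, List.isPrefixOf]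
        cases hb : PySem.Chars.isdigit c <;> simp [BEq.comm]
    simp only [pvFindVer, pvRA, hc]
    cases hq : pvQual pt
    · simp only [Bool.false_eq_true, if_false, ih]
      cases pvRA rest with
      | none => rfl
      | some uv => simp; omega
    · simp

theorem pv_join_splitOnP (cs : List Char) :
    PySem.Chars.join ['-'] (List.splitOnP (· == '-') cs) = cs := by
  have h1 : List.splitOnP (fun x => x == '-') cs = List.splitOn '-' cs := rfl
  have h2 : PySem.Chars.join ['-'] (List.splitOn '-' cs) = ['-'].intercalate (List.splitOn '-' cs) := rfl
  rw [h1, h2, List.intercalate_splitOn]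

theorem pv_parts_no_dash (cs : List Char) :
    ∀ pt ∈ List.splitOnP (· == '-') cs, '-' ∉ pt := by
  induction cs with
  | nil =>
    intro pt hpt
    simp [List.splitOnP_nil] at hpt
    simp [hpt]
  | cons c r ih =>
    intro pt hpt
    rw [List.splitOnP_cons] at hpt
    by_cases h : (c == '-') = true
    · simp only [h, if_true] at hpt
      rcases List.mem_cons.mp hpt with h1 | h1
      · simp [h1]
      · exact ih pt h1
    · simp only [h] at hpt
      obtain ⟨pt0, rest, hsp⟩ := pv_splitOnP_cons_ex r
      rw [hsp, List.modifyHead_cons] at hpt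
      rcases List.mem_cons.mp hpt with h1 | h1
      · subst h1
        intro hmem
        rcases List.mem_cons.mp hmem with h2 | h2
        · subst h2; simp at h
        · exact ih pt0 (by rw [hsp]; exact List.mem_cons_self) h2
      · exact ih pt (by rw [hsp]; exact List.mem_cons_of_mem _ h1)

theorem pv_join_cons_char (c : Char) (pt : List Char) (U : List (List Char)) :
    PySem.Chars.join ['-'] ((c :: pt) :: U) = c :: PySem.Chars.join ['-'] (pt :: U) := by
  cases U with
  | nil => simp [PySem.Chars.join_singleton]
  | cons u U' => simp [PySem.Chars.join_cons_cons]

theorem pv_join_nil_cons (U : List (List Char)) (h : U ≠ []) :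
    PySem.Chars.join ['-'] ([] :: U) = '-' :: PySem.Chars.join ['-'] U := by
  cases U with
  | nil => exact absurd rfl h
  | cons u U' => simp [PySem.Chars.join_cons_cons]

theorem pv_point (c : Char) (pt : List Char) (U V : List (List Char)) :
    (c :: (pvF (pt :: U, V)).1, (pvF (pt :: U, V)).2) = pvF ((c :: pt) :: U, V) := by
  simp [pvF, pv_join_cons_char]

theorem pv_point_dash (U V : List (List Char)) :
    ('-' :: (pvF (U, V)).1, (pvF (U, V)).2) = pvF ([] :: U, V) := by
  cases U with
  | nil => simp [pvF, PySem.Chars.join_singleton]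
  | cons u U' =>
    simp [pvF, pv_join_nil_cons]

theorem pv_join_append_last (U : List (List Char)) (w : List Char) (h : U ≠ []) :
    PySem.Chars.join ['-'] (U ++ [w]) = PySem.Chars.join ['-'] U ++ '-' :: w := by
  induction U with
  | nil => exact absurd rfl h
  | cons u0 U' ih =>
    cases U' with
    | nil => simp [PySem.Chars.join_singleton, PySem.Chars.join_cons_cons]
    | cons u1 U'' =>
      have hl : (u1 :: U'') ++ [w] = u1 :: (U'' ++ [w]) := rfl
      rw [List.cons_append, hl, PySem.Chars.join_cons_cons, PySem.Chars.join_cons_cons]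
      rw [← hl, ih (by simp)]
      simp

theorem pv_crux (t : List Char) :
    pvScan2 t true = (pvRA (List.splitOnP (· == '-') t)).map pvF ∧
    pvScan2 t false = (pvRAskip (List.splitOnP (· == '-') t)).map pvF := by
  induction t with
  | nil =>
    constructor <;> simp [pvScan2, List.splitOnP_nil, pvRA, pvRAskip, pvQual]
  | cons c r ih =>
    obtain ⟨pt, rest, hsp⟩ := pv_splitOnP_cons_ex r
    by_cases hc : c = '-'
    · subst hc
      have hq : pvQualC '-' = false := by decide
      have hsc : ∀ st : Bool, pvScan2 ('-' :: r) st =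
          ((pvRA (List.splitOnP (· == '-') r)).map pvF).map
            (fun uv => ('-' :: uv.1, uv.2)) := by
        intro st
        simp only [pvScan2, hq, Bool.and_false, Bool.false_eq_true, if_false]
        rw [show (('-' : Char) == '-') = true from rfl, ih.1]
      have hspl : List.splitOnP (· == '-') ('-' :: r) = [] :: List.splitOnP (· == '-') r := by
        rw [List.splitOnP_cons]; simp
      constructor <;>
      · rw [hsc, hspl]
        cases hra : pvRA (List.splitOnP (· == '-') r) with
        | none => simp [pvRA, pvRAskip, pvQual, hra]
        | some UV =>
          obtain ⟨U, V⟩ := UV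
          simp only [pvRA, pvRAskip, pvQual, hra, Option.map_some, Option.map_map,
            Bool.false_eq_true, if_false, Function.comp]
          exact congrArg some (pv_point_dash U V)
    · have hbeq : (c == '-') = false := by simp [hc]
      have hspl : List.splitOnP (· == '-') (c :: r) = (c :: pt) :: rest := by
        rw [List.splitOnP_cons, hbeq, hsp]; simp
      have hskip : pvScan2 (c :: r) false =
          ((pvRAskip ((c :: pt) :: rest)).map pvF) := by
        simp only [pvScan2, Bool.false_and, Bool.false_eq_true, if_false, hbeq]
        rw [ih.2, hsp]
        cases hra : pvRA rest with
        | none => simp [pvRAskip, hra]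
        | some UV =>
          obtain ⟨U, V⟩ := UV
          simp only [pvRAskip, hra, Option.map_some, Option.map_map, Function.comp]
          exact congrArg some (pv_point c pt U V)
      by_cases hqc : pvQualC c = true
      · constructor
        · have hj : PySem.Chars.join ['-'] ((c :: pt) :: rest) = c :: r := by
            rw [← hspl]; exact pv_join_splitOnP (c :: r)
          rw [hspl]
          simp only [pvScan2, hqc, Bool.true_and, if_true, pvRA, pvQual, pvF]
          simp [pvF, hj]
        · rw [hspl]; exact hskip
      · have hqc' : pvQualC c = false := by revert hqc; cases pvQualC c <;> simp
        have hq' : pvQual (c :: pt) = false := hqc'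
        constructor
        · rw [hspl]
          have hts : pvScan2 (c :: r) true = pvScan2 (c :: r) false := by
            simp only [pvScan2, hqc', Bool.and_false, Bool.true_and, Bool.false_and]
          rw [hts, hskip]
          simp [pvRA, pvRAskip, hq']
        · rw [hspl]; exact hskip

theorem pv_rfind_last {u w : List Char} (hw : '-' ∉ w) :
    PySem.Chars.rfind (u ++ '-' :: w) ['-'] = (u.length : Int) := by
  have aux : ∀ k : Nat, PySem.Chars.rfind.go (u ++ '-' :: w) ['-'] (u.length + k) = (u.length : Int) := by
    intro k
    induction k with
    | zero =>
      cases u with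
      | nil => simp [PySem.Chars.rfind.go, List.isPrefixOf]
      | cons a u' =>
        have hl : (a :: u').length + 0 = u'.length + 1 := by simp
        rw [hl]
        simp only [PySem.Chars.rfind.go]
        have hdrop : List.drop (u'.length + 1) ((a :: u') ++ '-' :: w) = '-' :: w := by
          have hl2 : u'.length + 1 = (a :: u').length := by simp
          rw [hl2, List.drop_left]
        rw [hdrop]
        simp [List.isPrefixOf]
    | succ k ih =>
      have hl : u.length + (k + 1) = (u.length + k) + 1 := by omega
      rw [hl]
      simp only [PySem.Chars.rfind.go]
      have hdrop : List.drop (u.length + k + 1) (u ++ '-' :: w) = List.drop k w := by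
        have h1 : u.length + k + 1 - u.length = k + 1 := by omega
        have h2 : List.drop (u.length + k + 1) u = [] := List.drop_eq_nil_of_le (by omega)
        rw [List.drop_append, h1, h2, List.nil_append, List.drop_succ_cons]
      rw [hdrop]
      have hpre : (['-'] : List Char).isPrefixOf (List.drop k w) = false := by
        cases hx : List.drop k w with
        | nil => simp [List.isPrefixOf]
        | cons d t =>
          simp [List.isPrefixOf]
          intro hdt
          apply hw
          rw [hdt]
          exact List.mem_of_mem_drop (by rw [hx]; exact List.mem_cons_self)
      rw [if_neg (by simp [hpre])]
      exact ih
  have hlen : (u ++ '-' :: w).length = u.length + (w.length + 1) := by simp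
  unfold PySem.Chars.rfind
  rw [hlen]
  exact aux (w.length + 1)

-- ===== VERDICT (by name: the statement is the Claim_ definition above) =====
theorem parse_name_version_py_spec : Claim_equal_parse_name_version_py := by
  intro name _
  unfold Spec_parse_name_version_py parse_name_version_py parse_name_version_py_alt
  by_cases h0 : name.toList.isEmpty
  · simp [h0]
  · simp only [h0, Bool.false_eq_true, if_false]
    rw [pv_splitOn_eq]
    by_cases hd : '-' ∈ name.toList
    · have hcnt : 0 < name.toList.countP (· == '-') :=
        List.countP_pos_iff.mpr ⟨'-', hd, by simp⟩
      have hlen : ¬ (List.splitOnP (· == '-') name.toList).length < 2 := by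
        rw [pv_length_splitOnP]; omega
      have hisin : PySem.Chars.isIn ['-'] name.toList = true :=
        (PySem.Chars.isIn_iff_infix _ _).mpr ((List.singleton_infix_iff _ _).mpr hd)
      simp only [hlen, if_false, hisin, Bool.not_true, Bool.false_eq_true]
      rw [pv_findVer_eq, pv_scanB_eq]
      cases hra : pvRA (List.splitOnP (· == '-') name.toList) with
      | none =>
        have hsc : pvScan2 name.toList true = none := by
          rw [(pv_crux name.toList).1, hra]; rfl
        simp only [hra, hsc, Option.map_none]
        set P := List.splitOnP (· == '-') name.toList with hP
        have hne : P ≠ [] := by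
          intro hx; rw [hx] at hlen; simp at hlen
        have hU0 : P.dropLast ≠ [] := by
          intro hx
          have hx' := congrArg List.length hx
          rw [List.length_dropLast, hP, pv_length_splitOnP] at hx'
          simp only [List.length_nil] at hx'
          omega
        have hdec : P.dropLast ++ [P.getLast hne] = P := List.dropLast_append_getLast hne
        have hnd : ∀ pt ∈ P, '-' ∉ pt := by rw [hP]; exact pv_parts_no_dash name.toList
        have hwnd : '-' ∉ P.getLast hne := hnd _ (List.getLast_mem hne)
        have hcs : name.toList = PySem.Chars.join ['-'] P.dropLast ++ '-' :: P.getLast hne := by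
          conv_lhs => rw [← pv_join_splitOnP name.toList, ← hP, ← hdec]
          exact pv_join_append_last _ _ hU0
        have hrf : PySem.Chars.rfind name.toList ['-'] =
            ((PySem.Chars.join ['-'] P.dropLast).length : Int) := by
          conv_lhs => rw [hcs]
          exact pv_rfind_last hwnd
        rw [PySem.List.slice_to_neg_one, PySem.List.pyGetD_neg_one _ _ hne, hrf]
        have htoNat : (((PySem.Chars.join ['-'] P.dropLast).length : Int)).toNat =
            (PySem.Chars.join ['-'] P.dropLast).length := Int.toNat_natCast _
        rw [htoNat]
        simp only [Prod.mk.injEq]; refine ⟨?_, ?_⟩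
        · congr 1
          conv_rhs => rw [hcs]
          exact (List.take_left' rfl).symm
        · congr 1
          have hdrop2 : List.drop ((PySem.Chars.join ['-'] P.dropLast).length + 1)
              (PySem.Chars.join ['-'] P.dropLast ++ '-' :: P.getLast hne) = P.getLast hne := by
            rw [show PySem.Chars.join ['-'] P.dropLast ++ '-' :: P.getLast hne =
                (PySem.Chars.join ['-'] P.dropLast ++ ['-']) ++ P.getLast hne by simp]
            rw [show (PySem.Chars.join ['-'] P.dropLast).length + 1 =
                (PySem.Chars.join ['-'] P.dropLast ++ ['-']).length by simp]
            exact List.drop_left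
          conv_rhs => rw [hcs, hdrop2]
      | some UV =>
        obtain ⟨U, V⟩ := UV
        have hsc : pvScan2 name.toList true = some (pvF (U, V)) := by
          rw [(pv_crux name.toList).1, hra]; rfl
        have hUV : U ++ V = List.splitOnP (· == '-') name.toList := pv_RA_append hra
        simp only [hra, hsc, Option.map_some]
        have hslt : PySem.List.slice (List.splitOnP (· == '-') name.toList) none (some ((U.length + 0 : Nat) : Int)) = U := by
          rw [PySem.List.slice_to_natCast, ← hUV]
          simp [List.take_left]
        have hslf : PySem.List.slice (List.splitOnP (· == '-') name.toList) (some ((U.length + 0 : Nat) : Int)) none = V := by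
          rw [PySem.List.slice_from_natCast, ← hUV]
          simp [List.drop_left]
        rw [hslt, hslf]
        cases U with
        | nil =>
          have hV : V = List.splitOnP (· == '-') name.toList := by simpa using hUV
          simp [pvF, hV, pv_join_splitOnP]
        | cons u0 U' =>
          have hpf : (pvF (u0 :: U', V)).1 = PySem.Chars.join ['-'] (u0 :: U') ++ ['-'] := by
            simp [pvF]
          have hcs : name.toList = PySem.Chars.join ['-'] (u0 :: U') ++ '-' :: PySem.Chars.join ['-'] V := by
            have hap := pv_scan2_append hsc
            simp only [pvF] at hap
            rw [← hap]; simp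
          rw [hpf]
          simp only [Prod.mk.injEq, List.length_append, List.length_cons, List.length_nil,
            Nat.add_zero, Nat.zero_add, Nat.add_sub_cancel]
          refine ⟨?_, ?_⟩
          · by_cases hz : (PySem.Chars.join ['-'] (u0 :: U')).length = 0
            · have hnil : PySem.Chars.join ['-'] (u0 :: U') = [] := List.eq_nil_of_length_eq_zero hz
              simp [hnil, hz]
            · have hc2 : (PySem.Chars.join ['-'] (u0 :: U')).isEmpty = false := by
                cases hx : PySem.Chars.join ['-'] (u0 :: U') with
                | nil => rw [hx] at hz; simp at hz
                | cons a b => rfl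
              rw [if_neg (by omega : ¬ ((PySem.Chars.join ['-'] (u0 :: U')).length + 1 ≤ 1))]
              simp only [hc2, Bool.false_eq_true, if_false]
              congr 1
              conv_rhs => rw [hcs]
              exact (List.take_left' rfl).symm
          · congr 1
            have hdrop2 : List.drop ((PySem.Chars.join ['-'] (u0 :: U')).length + 1)
                (PySem.Chars.join ['-'] (u0 :: U') ++ '-' :: PySem.Chars.join ['-'] V) =
                PySem.Chars.join ['-'] V := by
              rw [show PySem.Chars.join ['-'] (u0 :: U') ++ '-' :: PySem.Chars.join ['-'] V =
                  (PySem.Chars.join ['-'] (u0 :: U') ++ ['-']) ++ PySem.Chars.join ['-'] V by simp]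
              rw [show (PySem.Chars.join ['-'] (u0 :: U')).length + 1 =
                  (PySem.Chars.join ['-'] (u0 :: U') ++ ['-']).length by simp]
              exact List.drop_left
            conv_rhs => rw [hcs, hdrop2]
    · have hcnt : name.toList.countP (· == '-') = 0 :=
        List.countP_eq_zero.mpr (by intro a ha hpa; exact hd ((by simpa using hpa : a = '-') ▸ ha))
      have hlen : (List.splitOnP (· == '-') name.toList).length < 2 := by
        rw [pv_length_splitOnP, hcnt]; omega
      have hisin : PySem.Chars.isIn ['-'] name.toList = false := by
        cases hx : PySem.Chars.isIn ['-'] name.toList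
        · rfl
        · exact absurd ((List.singleton_infix_iff _ _).mp ((PySem.Chars.isIn_iff_infix _ _).mp hx)) hd
      simp [hlen, hisin]
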